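-- pv_equiv track=rewrite | github.com/GehriJan/Automat | reg2nea.py | countBrackets
-- ===== SOURCE A (Python) =====
-- def countBrackets(input: str) -> list:
--     # outputs a list of numbers indicating the number of opened bracket
--     # "environments" to the specific index (including the index)
--     stringList: list = list(input)
--     counter: int = 0
--
--     for i in range(len(input)):
--         if stringList[i]=='(':
--             counter += 1
--         if stringList[i]==')':
--             counter -= 1
--         stringList[i]=counter
--
--     return stringList
-- ===== SOURCE B (Python) =====
-- def countBrackets(input: str) -> list:
--     # Divide and conquer: depths of each half are computed independently;
--     # the right half's depths are then offset by the left half's final balance.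
--     def go(s):
--         if len(s) <= 1:
--             if not s:
--                 return []
--             return [1 if s == '(' else -1 if s == ')' else 0]
--         m = len(s) // 2
--         left = go(s[:m])
--         right = go(s[m:])
--         off = left[-1]
--         return left + [off + v for v in right]
--     return go(input)
-- ===== Notes on version B (the rewrite author's own statement) =====
-- stated objective: alternative
-- what changed: Replaced the stateful left-to-right counter loop with a divide-and-conquer recursion: each half of the string is solved independently and the right half's depth list is shifted by the left half's final balance.
import Mathlib
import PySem

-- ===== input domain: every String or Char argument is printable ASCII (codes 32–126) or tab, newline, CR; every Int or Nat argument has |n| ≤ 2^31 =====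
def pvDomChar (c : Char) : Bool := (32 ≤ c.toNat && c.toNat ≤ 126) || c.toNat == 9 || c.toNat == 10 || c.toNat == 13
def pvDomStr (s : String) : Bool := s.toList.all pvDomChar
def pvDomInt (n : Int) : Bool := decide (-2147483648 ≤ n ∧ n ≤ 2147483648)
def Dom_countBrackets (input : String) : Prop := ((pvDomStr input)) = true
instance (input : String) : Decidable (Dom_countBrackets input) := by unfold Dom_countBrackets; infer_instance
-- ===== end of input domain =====

-- B replaces A's stateful counter loop with a divide-and-conquer recursion on
-- string halves (right half offset by the left half's final balance).

-- ===== PORT A =====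
-- A walks the char list with a running counter, overwriting each cell with the
-- current counter value; ported as structural recursion carrying the counter.
def countBracketsLoop (counter : Int) : List Char → List Int
  | [] => []
  | c :: rest =>
      let counter1 := if c = '(' then counter + 1 else counter
      let counter2 := if c = ')' then counter1 - 1 else counter1
      counter2 :: countBracketsLoop counter2 rest

def countBrackets (input : String) : List Int :=
  countBracketsLoop 0 input.toList

-- ===== PORT B =====
-- go from Source B; s[:m]/s[m:] with 0 ≤ m ≤ len are exactly take/drop (exact);
-- left[-1] never fails in Source B (left half nonempty), ported as getLast?.getD 0.
def cbGo (s : List Char) : List Int :=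
  if s.length ≤ 1 then
    match s with
    | [] => []
    | c :: _ => [if c = '(' then 1 else if c = ')' then -1 else 0]
  else
    let m := s.length / 2
    let left := cbGo (s.take m)
    let right := cbGo (s.drop m)
    let off := left.getLast?.getD 0
    left ++ right.map (fun v => off + v)
termination_by s.length
decreasing_by
  · simp only [List.length_take]
    omega
  · simp only [List.length_drop]
    omega

def countBrackets_alt (input : String) : List Int :=
  cbGo input.toList

-- ===== PRECONDITION & SPEC =====
def Spec_countBrackets (input : String) (out : List Int) : Prop := out = countBrackets_alt input
instance (input : String) (out : List Int) : Decidable (Spec_countBrackets input out) := by unfold Spec_countBrackets; infer_instance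

-- ===== CLAIM (what is proved, stated in full; the proofs are below) =====
def Claim_equal_countBrackets : Prop := ∀ (input : String), Dom_countBrackets input → Spec_countBrackets input (countBrackets input)

-- ===== LEMMAS AND PROOFS =====

-- per-char delta and total balance (proof-side helpers)
def cbDelta (x : Char) : Int := if x = '(' then 1 else if x = ')' then -1 else 0

def cbBal (s : List Char) : Int := (s.map cbDelta).sum

theorem cbStep (c : Int) (x : Char) :
    (if x = ')' then (if x = '(' then c + 1 else c) - 1 else (if x = '(' then c + 1 else c))
      = c + cbDelta x := by
  by_cases h1 : x = '(' <;> by_cases h2 : x = ')' <;> simp_all [cbDelta] <;> ring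

theorem cbLoop_cons (c : Int) (x : Char) (r : List Char) :
    countBracketsLoop c (x :: r) = (c + cbDelta x) :: countBracketsLoop (c + cbDelta x) r := by
  simp only [countBracketsLoop]
  rw [cbStep]

theorem cbLoop_ne_nil (c : Int) (x : Char) (r : List Char) :
    countBracketsLoop c (x :: r) ≠ [] := by
  rw [cbLoop_cons]; simp

-- A's loop starting from c is the loop from 0 shifted by c
theorem cbLoop_shift (s : List Char) : ∀ c : Int,
    countBracketsLoop c s = (countBracketsLoop 0 s).map (fun v => c + v) := by
  induction s with
  | nil => intro c; rfl
  | cons x r ih =>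
      intro c
      rw [cbLoop_cons, cbLoop_cons, List.map_cons, ih (c + cbDelta x), ih (0 + cbDelta x),
        List.map_map]
      refine List.cons_eq_cons.mpr ⟨by ring, ?_⟩
      apply List.map_congr_left
      intro v _
      simp only [Function.comp]
      ring

-- A's loop splits over append, restarting at c + bal of the prefix
theorem cbLoop_append (xs ys : List Char) : ∀ c : Int,
    countBracketsLoop c (xs ++ ys)
      = countBracketsLoop c xs ++ countBracketsLoop (c + cbBal xs) ys := by
  induction xs with
  | nil => intro c; simp [countBracketsLoop, cbBal]
  | cons x r ih =>
      intro c
      rw [List.cons_append, cbLoop_cons, cbLoop_cons, ih, List.cons_append]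
      have : c + cbDelta x + cbBal r = c + cbBal (x :: r) := by
        simp [cbBal]; ring
      rw [this]

-- the last element of A's loop from c on a nonempty list is c + bal
theorem cbLoop_getLast (s : List Char) (hs : s ≠ []) : ∀ c : Int,
    (countBracketsLoop c s).getLast? = some (c + cbBal s) := by
  induction s with
  | nil => exact absurd rfl hs
  | cons x r ih =>
      intro c
      rw [cbLoop_cons]
      cases r with
      | nil => simp [countBracketsLoop, cbBal]
      | cons y rs =>
          have hne := cbLoop_ne_nil (c + cbDelta x) y rs
          obtain ⟨b, m, hbm⟩ : ∃ b m, countBracketsLoop (c + cbDelta x) (y :: rs) = b :: m := by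
            cases h : countBracketsLoop (c + cbDelta x) (y :: rs) with
            | nil => exact absurd h hne
            | cons b m => exact ⟨b, m, rfl⟩
          rw [hbm, List.getLast?_cons_cons, ← hbm, ih (by simp) (c + cbDelta x)]
          have : c + cbDelta x + cbBal (y :: rs) = c + cbBal (x :: y :: rs) := by
            simp [cbBal]; ring
          rw [this]

-- B's divide and conquer equals A's loop from 0
theorem cbGo_eq_loop (s : List Char) : cbGo s = countBracketsLoop 0 s := by
  induction hn : s.length using Nat.strong_induction_on generalizing s with
  | _ n ih =>
    subst hn
    rw [cbGo.eq_def]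
    by_cases h : s.length ≤ 1
    · simp only [h, if_true]
      match s, h with
      | [], _ => rfl
      | [c], _ =>
          rw [cbLoop_cons]
          simp [countBracketsLoop, cbDelta]
    · simp only [h, if_false]
      have h2 : 2 ≤ s.length := by omega
      have hm1 : 1 ≤ s.length / 2 := by omega
      have hm2 : s.length / 2 < s.length := by omega
      have hL := ih (s.take (s.length / 2)).length
        (by simp [List.length_take]; omega) _ rfl
      have hR := ih (s.drop (s.length / 2)).length
        (by simp [List.length_drop]; omega) _ rfl
      have htd : s.take (s.length / 2) ++ s.drop (s.length / 2) = s :=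
        List.take_append_drop _ _
      have hne : s.take (s.length / 2) ≠ [] := by
        intro hnil
        rcases List.take_eq_nil_iff.mp hnil with h0 | h0
        · omega
        · rw [h0] at h2; simp at h2
      simp only [hL, hR]
      rw [cbLoop_getLast _ hne 0]
      conv_rhs =>
        rw [← htd, cbLoop_append,
          cbLoop_shift (s.drop (s.length / 2)) (0 + cbBal (s.take (s.length / 2)))]
      simp

-- ===== VERDICT (by name: the statement is the Claim_ definition above) =====
theorem countBrackets_spec : Claim_equal_countBrackets := by
  intro input _
  unfold Spec_countBrackets countBrackets countBrackets_alt
  exact (cbGo_eq_loop input.toList).symm
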